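-- pv_equiv track=rewrite | github.com/ctsweeney/adventcode | day5/5.1.py | check_boarding_row
-- ===== SOURCE A (Python) =====
-- def check_boarding_row(data):
--     # Check Row
--     row = 0
--     for r in range(7):
--         if data[r] == "B":
--             row += 1 << (6 - r)
--     # Check columns
--     col = 0
--     for c in range(3):
--         if data[c + 7] == "R":
--             col += 1 << (2 - c)
--
--     # Calclate seat number
--     return row * 8 + col
-- ===== SOURCE B (Python) =====
-- def check_boarding_row(data):
--     # Build the 10-bit representation once, then parse it as a binary number.
--     bits = ""
--     for i in range(10):
--         bits += "1" if data[i] == ("B" if i < 7 else "R") else "0"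
--     return int(bits, 2)
-- ===== Notes on version B (the rewrite author's own statement) =====
-- stated objective: idiomatic
-- what changed: Replaces A's two positional bit-shift accumulator loops and the row*8+col recombination with a single loop that builds the 10-character bit string and parses it once as a binary number.
import Mathlib
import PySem

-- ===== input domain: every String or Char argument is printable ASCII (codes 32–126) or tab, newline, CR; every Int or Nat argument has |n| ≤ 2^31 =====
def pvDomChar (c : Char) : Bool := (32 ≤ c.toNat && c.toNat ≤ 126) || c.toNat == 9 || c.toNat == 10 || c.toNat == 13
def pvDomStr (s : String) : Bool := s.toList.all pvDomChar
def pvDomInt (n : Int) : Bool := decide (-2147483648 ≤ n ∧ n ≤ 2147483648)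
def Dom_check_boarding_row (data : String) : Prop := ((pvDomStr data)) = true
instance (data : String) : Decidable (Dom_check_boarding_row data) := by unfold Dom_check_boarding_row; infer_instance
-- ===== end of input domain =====

-- B builds the 10-bit string in one loop and parses it as binary, instead of A's two
-- positional bit-shift loops recombined as row*8+col (objective: idiomatic decomposition).

-- ===== PORT A =====
def check_boarding_row (data : String) : Int :=
  let s := data.toList
  -- row loop: for r in range(7): if data[r] == "B": row += 1 << (6 - r)
  let row : Int := (PySem.List.pyRange 0 7 1).foldl
    (fun row r => if PySem.List.pyGetD s r ' ' = 'B' then row + 2 ^ (6 - r).toNat else row) 0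
  -- col loop: for c in range(3): if data[c + 7] == "R": col += 1 << (2 - c)
  let col : Int := (PySem.List.pyRange 0 3 1).foldl
    (fun col c => if PySem.List.pyGetD s (c + 7) ' ' = 'R' then col + 2 ^ (2 - c).toNat else col) 0
  row * 8 + col

-- ===== PORT B =====
def check_boarding_row_alt (data : String) : Int :=
  let s := data.toList
  -- for i in range(10): bits += "1" if data[i] == ("B" if i < 7 else "R") else "0"
  let bits : List Char := (PySem.List.pyRange 0 10 1).foldl
    (fun bits i =>
      bits ++ [if PySem.List.pyGetD s i ' ' = (if i < 7 then 'B' else 'R') then '1' else '0'])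
    []
  -- int(bits, 2): hand port of base-2 parsing (exact: bits consists only of '0'/'1')
  bits.foldl (fun a c => 2 * a + (if c = '1' then 1 else 0)) 0

-- ===== PRECONDITION & SPEC =====
-- A raises IndexError when the string has fewer than 10 characters; exactly those inputs are excluded.
def Pre_check_boarding_row (data : String) : Prop := 10 ≤ data.toList.length
instance (data : String) : Decidable (Pre_check_boarding_row data) := by
  unfold Pre_check_boarding_row; infer_instance
def pvWitness_check_boarding_row : String := "FBFBBFFRLR"

def Spec_check_boarding_row (data : String) (out : Int) : Prop := out = check_boarding_row_alt data
instance (data : String) (out : Int) : Decidable (Spec_check_boarding_row data out) := by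
  unfold Spec_check_boarding_row; infer_instance

-- ===== CLAIM (what is proved, stated in full; the proofs are below) =====
def Claim_equal_check_boarding_row : Prop := ∀ (data : String), Dom_check_boarding_row data → Pre_check_boarding_row data → Spec_check_boarding_row data (check_boarding_row data)

-- ===== LEMMAS AND PROOFS =====
theorem pv_ite_add (c : Prop) [Decidable c] (x k : Int) :
    (if c then x + k else x) = x + k * (if c then 1 else 0) := by
  split_ifs <;> ring

theorem pv_ite_bit (c : Prop) [Decidable c] :
    (if (if c then '1' else '0') = '1' then (1 : Int) else 0) = (if c then 1 else 0) := by
  split_ifs with h1 h2 <;> simp_all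

def pvB (c : Prop) [Decidable c] : Int := if c then 1 else 0

theorem pv_ite_eq (c : Prop) [Decidable c] (k : Int) :
    (if c then k else 0) = pvB c * k := by
  unfold pvB; split_ifs <;> ring

theorem pv_cond (c : Prop) [Decidable c] :
    (¬c → ('0' : Char) = '1') = c := by
  simp

-- ===== VERDICT (by name: the statement is the Claim_ definition above) =====
theorem check_boarding_row_spec : Claim_equal_check_boarding_row := by
  intro data _ hpre
  unfold Spec_check_boarding_row check_boarding_row check_boarding_row_alt
  unfold Pre_check_boarding_row at hpre
  generalize data.toList = l at hpre ⊢
  rcases l with _ | ⟨c0, l⟩; · simp at hpre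
  rcases l with _ | ⟨c1, l⟩; · simp at hpre
  rcases l with _ | ⟨c2, l⟩; · simp at hpre
  rcases l with _ | ⟨c3, l⟩; · simp at hpre
  rcases l with _ | ⟨c4, l⟩; · simp at hpre
  rcases l with _ | ⟨c5, l⟩; · simp at hpre
  rcases l with _ | ⟨c6, l⟩; · simp at hpre
  rcases l with _ | ⟨c7, l⟩; · simp at hpre
  rcases l with _ | ⟨c8, l⟩; · simp at hpre
  rcases l with _ | ⟨c9, l⟩; · simp at hpre
  rw [show PySem.List.pyRange 0 7 1 = [0,1,2,3,4,5,6] from by decide,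
      show PySem.List.pyRange 0 3 1 = [0,1,2] from by decide,
      show PySem.List.pyRange 0 10 1 = [0,1,2,3,4,5,6,7,8,9] from by decide]
  norm_num [List.foldl, List.flatten, List.map, PySem.List.pyGetD_ofNat', pv_ite_add, pv_ite_bit]
  simp only [pv_cond, pv_ite_eq, show Int.toNat 6 = 6 from rfl, show Int.toNat 5 = 5 from rfl,
    show Int.toNat 4 = 4 from rfl, show Int.toNat 3 = 3 from rfl, show Int.toNat 2 = 2 from rfl]
  ring
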